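-- pv_equiv track=rewrite | github.com/juhnowski/search_portal | infoportal/search/engines/simple/builder.py | index_one_file
-- ===== SOURCE A (Python) =====
-- def index_one_file(termlist):
--     fileIndex = {}
--     for index, word in enumerate(termlist):
--         if word in fileIndex.keys():
--             fileIndex[word].append(index)
--         else:
--             fileIndex[word] = [index]
--     return fileIndex
-- ===== SOURCE B (Python) =====
-- def index_one_file(termlist):
--     # Distinct words in first-appearance order, then one comprehension per word
--     # collecting its positions (instead of A's streaming dict insertion).
--     return {w: [i for i, t in enumerate(termlist) if t == w]
--             for w in dict.fromkeys(termlist)}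
-- ===== Notes on version B (the rewrite author's own statement) =====
-- stated objective: simpler
-- what changed: Replaces A's streaming membership-test/append loop over an evolving dict with a two-stage comprehension: first the distinct words (dict.fromkeys, first-appearance order), then the position list of each word gathered by a direct scan.
import Mathlib
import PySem

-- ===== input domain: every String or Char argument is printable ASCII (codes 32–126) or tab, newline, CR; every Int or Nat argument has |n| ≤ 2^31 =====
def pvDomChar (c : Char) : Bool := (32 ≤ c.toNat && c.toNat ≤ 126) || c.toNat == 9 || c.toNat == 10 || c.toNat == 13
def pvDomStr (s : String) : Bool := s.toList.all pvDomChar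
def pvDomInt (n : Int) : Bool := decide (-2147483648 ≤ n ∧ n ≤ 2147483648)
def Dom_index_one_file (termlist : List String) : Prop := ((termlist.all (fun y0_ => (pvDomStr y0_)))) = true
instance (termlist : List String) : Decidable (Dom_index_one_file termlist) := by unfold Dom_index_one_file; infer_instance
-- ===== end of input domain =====

-- B replaces A's streaming dict loop by "distinct words, then a per-word position scan": simpler decomposition, same values and key order.


-- ===== PORT A =====
def index_one_file (termlist : List String) : List (String × List Int) :=
  ((PySem.List.enumerate termlist 0).foldl
    (fun d p =>
      if d.contains p.2 then d.modify p.2 [] (fun v => v ++ [p.1])  -- fileIndex[word].append(index)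
      else d.insert p.2 [p.1])                                      -- fileIndex[word] = [index]
    PySem.Dict.empty).items

-- ===== PORT B =====
def index_one_file_alt (termlist : List String) : List (String × List Int) :=
  (PySem.List.dedup termlist).map
    (fun w => (w, ((PySem.List.enumerate termlist 0).filter (fun p => p.2 == w)).map (fun p => p.1)))

-- ===== PRECONDITION & SPEC =====
def Spec_index_one_file (termlist : List String) (out : List (String × List Int)) : Prop := out = index_one_file_alt termlist
instance (termlist : List String) (out : List (String × List Int)) : Decidable (Spec_index_one_file termlist out) := by unfold Spec_index_one_file; infer_instance

-- ===== CLAIM (what is proved, stated in full; the proofs are below) =====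
def Claim_equal_index_one_file : Prop := ∀ (termlist : List String), Dom_index_one_file termlist → Spec_index_one_file termlist (index_one_file termlist)

-- ===== LEMMAS AND PROOFS =====

-- A's two branches are a single Dict.modify (the else-branch inserts [] ++ [index]).
theorem step_eq_modify (d : PySem.Dict String (List Int)) (p : Int × String) :
    (if d.contains p.2 then d.modify p.2 [] (fun v => v ++ [p.1]) else d.insert p.2 [p.1])
      = d.modify p.2 [] (fun v => v ++ [p.1]) := by
  by_cases h : d.contains p.2 = true
  · simp [h]
  · simp only [Bool.not_eq_true] at h
    simp [h, PySem.Dict.modify, PySem.Dict.getD_of_not_contains _ _ h]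

-- The dict A builds, as a fold keyed on the first component (via Prod.swap).
theorem fold_eq_swap (l : List (Int × String)) :
    l.foldl
      (fun d p =>
        if d.contains p.2 then d.modify p.2 [] (fun v => v ++ [p.1]) else d.insert p.2 [p.1])
      PySem.Dict.empty
      = (l.map Prod.swap).foldl
          (fun d q => d.modify q.1 [] (fun v => v ++ [q.2])) PySem.Dict.empty := by
  rw [List.foldl_map]
  have h : (fun (d : PySem.Dict String (List Int)) (p : Int × String) =>
      if d.contains p.2 then d.modify p.2 [] (fun v => v ++ [p.1]) else d.insert p.2 [p.1])
    = fun d p => d.modify p.2 [] (fun v => v ++ [p.1]) :=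
    funext fun d => funext fun p => step_eq_modify d p
  rw [h]; simp [Prod.swap]

theorem index_one_file_spec_aux (termlist : List String) :
    index_one_file termlist = index_one_file_alt termlist := by
  unfold index_one_file index_one_file_alt
  rw [fold_eq_swap]
  set l := (PySem.List.enumerate termlist 0).map Prod.swap with hl
  have hkeys :
      (l.foldl (fun d q => d.modify q.1 [] (fun v => v ++ [q.2])) PySem.Dict.empty).keys
        = PySem.List.dedup termlist := by
    have := PySem.Dict.keys_foldl_modify_key l (fun q => q.1) []
      (fun _ q v => v ++ [q.2]) PySem.Dict.empty
    simp only [hl] at this ⊢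
    simpa [PySem.Dict.keys_empty, PySem.Set.update_nil_left, List.map_map,
      Function.comp_def, Prod.swap, PySem.List.map_snd_enumerate] using this
  have hnd :
      (l.foldl (fun d q => d.modify q.1 [] (fun v => v ++ [q.2])) PySem.Dict.empty).keys.Nodup := by
    exact PySem.Dict.nodup_keys_foldl_modify_key l (fun q => q.1) []
      (fun _ q v => v ++ [q.2]) PySem.Dict.empty (by simp [PySem.Dict.keys_empty])
  rw [PySem.Dict.items_eq_map_keys _ hnd [], hkeys]
  refine List.map_congr_left (fun w _ => ?_)
  have hget := PySem.Dict.getD_foldl_modify_append l PySem.Dict.empty w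
  rw [hget, PySem.Dict.getD_empty, List.nil_append, hl, List.filter_map, List.map_map]
  simp [Function.comp_def]

-- ===== VERDICT (by name: the statement is the Claim_ definition above) =====
theorem index_one_file_spec : Claim_equal_index_one_file := by
  intro termlist _
  exact index_one_file_spec_aux termlist
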